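-- pv_equiv track=rewrite | github.com/eamars/KazusaAIChatbot | src/kazusa_ai_chatbot/rag/memory_evidence_agent.py | _deterministic_plan
-- ===== SOURCE A (Python) =====
-- from typing import Any
--
-- def _strip_prefix(task: str) -> str:
--     """Remove the semantic capability prefix when present."""
--     if ":" not in task:
--         return task.strip()
--     _, _, remainder = task.partition(":")
--     return_value = remainder.strip()
--     return return_value
--
-- def _deterministic_plan(task: str) -> dict[str, Any] | None:
--     """Parse structured memory-evidence slots without selector LLM."""
--     task_body = _strip_prefix(task)
--     normalized = task_body.lower()
--
--     if "active agreement" in normalized or "active promise" in normalized: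
--         plan = {
--             "worker": "incompatible",
--             "reason": "Recall",
--         }
--         return plan
--
--     live_markers = (
--         "current weather",
--         "current temperature",
--         "opening status",
--         "current opening",
--         "exchange rate",
--         "current price",
--     )
--     if any(marker in normalized for marker in live_markers):
--         plan = {
--             "worker": "incompatible",
--             "reason": "Live-context",
--         }
--         return plan
--
--     person_markers = (
--         "profile",
--         "impression",
--         "relationship",
--         "compatibility",
--     )
--     if any(marker in normalized for marker in person_markers):
--         plan = {
--             "worker": "incompatible",
--             "reason": "Person-context",
--         }
--         return plan
--
--     exact_markers = (
--         "named fact",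
--         "proper noun",
--         "memory_name",
--         "dedup_key",
--         "tag",
--         "exact",
--         '"',
--     )
--     if any(marker in normalized for marker in exact_markers):
--         plan = {
--             "worker": "persistent_memory_keyword_agent",
--             "reason": "durable named fact or exact memory evidence",
--         }
--         return plan
--
--     plan = {
--         "worker": "persistent_memory_search_agent",
--         "reason": "semantic durable memory evidence",
--     }
--     return plan
-- ===== SOURCE B (Python) =====
-- # B: score every marker against the normalized task at once and pick the plan of
-- # minimal priority among all matches, instead of an early-return branch chain.
-- _MARKER_GROUP = [
--     ("active agreement", 0), ("active promise", 0),
--     ("current weather", 1), ("current temperature", 1), ("opening status", 1),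
--     ("current opening", 1), ("exchange rate", 1), ("current price", 1),
--     ("profile", 2), ("impression", 2), ("relationship", 2), ("compatibility", 2),
--     ("named fact", 3), ("proper noun", 3), ("memory_name", 3), ("dedup_key", 3),
--     ("tag", 3), ("exact", 3), ('"', 3),
-- ]
-- _PLANS = [
--     {"worker": "incompatible", "reason": "Recall"},
--     {"worker": "incompatible", "reason": "Live-context"},
--     {"worker": "incompatible", "reason": "Person-context"},
--     {"worker": "persistent_memory_keyword_agent",
--      "reason": "durable named fact or exact memory evidence"},
--     {"worker": "persistent_memory_search_agent",
--      "reason": "semantic durable memory evidence"},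
-- ]
--
--
-- def _deterministic_plan(task: str):
--     i = task.find(":")
--     normalized = (task[i + 1:] if i >= 0 else task).strip().lower()
--     hits = [g for m, g in _MARKER_GROUP if m in normalized]
--     best = min(hits, default=len(_PLANS) - 1)
--     return dict(_PLANS[best])
-- ===== Notes on version B (the rewrite author's own statement) =====
-- stated objective: alternative
-- what changed: B replaces A's early-return if-chain by an aggregation: it tests every marker against the normalized string, collects the priority group of each hit, and indexes the plan table with the minimum group (default = fallback plan); prefix stripping uses find/slice instead of partition.
import Mathlib
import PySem

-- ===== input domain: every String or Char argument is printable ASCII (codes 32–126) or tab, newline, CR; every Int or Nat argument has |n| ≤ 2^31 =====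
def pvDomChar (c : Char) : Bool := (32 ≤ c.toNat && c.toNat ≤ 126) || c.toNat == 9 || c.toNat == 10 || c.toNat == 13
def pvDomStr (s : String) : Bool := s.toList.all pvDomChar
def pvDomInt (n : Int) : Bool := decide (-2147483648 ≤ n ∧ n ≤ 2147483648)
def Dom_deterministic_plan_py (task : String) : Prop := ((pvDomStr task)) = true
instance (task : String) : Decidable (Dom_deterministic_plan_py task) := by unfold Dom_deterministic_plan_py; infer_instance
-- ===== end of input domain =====

-- B replaces A's early-return if-chain by an aggregation: every marker is scored against the
-- normalized string and the plan of the MINIMUM matching priority group is selected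
-- (objective: alternative decomposition; same asymptotic cost).

-- ===== PORT A =====
-- hand port of task.partition(":")[2] (the suffix after the FIRST ':'); exact whenever ':' occurs in the string
def afterColonA : List Char → List Char
  | [] => []
  | c :: cs => if c = ':' then cs else afterColonA cs

-- port of _strip_prefix
def strip_prefix_py (task : String) : String :=
  if PySem.Str.isIn ":" task = false then PySem.Str.strip task
  else PySem.Str.strip (String.ofList (afterColonA task.toList))

def deterministic_plan_py (task : String) : List (String × String) :=
  let normalized := PySem.Str.lower (strip_prefix_py task)
  if PySem.Str.isIn "active agreement" normalized || PySem.Str.isIn "active promise" normalized then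
    [("worker", "incompatible"), ("reason", "Recall")]
  else if ["current weather", "current temperature", "opening status", "current opening",
           "exchange rate", "current price"].any (fun m => PySem.Str.isIn m normalized) then
    [("worker", "incompatible"), ("reason", "Live-context")]
  else if ["profile", "impression", "relationship", "compatibility"].any
           (fun m => PySem.Str.isIn m normalized) then
    [("worker", "incompatible"), ("reason", "Person-context")]
  else if ["named fact", "proper noun", "memory_name", "dedup_key", "tag", "exact", "\""].any
           (fun m => PySem.Str.isIn m normalized) then
    [("worker", "persistent_memory_keyword_agent"),
     ("reason", "durable named fact or exact memory evidence")]
  else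
    [("worker", "persistent_memory_search_agent"),
     ("reason", "semantic durable memory evidence")]

-- ===== PORT B =====
def altMarkerGroup : List (String × Int) :=
  [ ("active agreement", 0), ("active promise", 0),
    ("current weather", 1), ("current temperature", 1), ("opening status", 1),
    ("current opening", 1), ("exchange rate", 1), ("current price", 1),
    ("profile", 2), ("impression", 2), ("relationship", 2), ("compatibility", 2),
    ("named fact", 3), ("proper noun", 3), ("memory_name", 3), ("dedup_key", 3),
    ("tag", 3), ("exact", 3), ("\"", 3) ]

def altPlans : List (List (String × String)) :=
  [ [("worker", "incompatible"), ("reason", "Recall")],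
    [("worker", "incompatible"), ("reason", "Live-context")],
    [("worker", "incompatible"), ("reason", "Person-context")],
    [("worker", "persistent_memory_keyword_agent"),
     ("reason", "durable named fact or exact memory evidence")],
    [("worker", "persistent_memory_search_agent"),
     ("reason", "semantic durable memory evidence")] ]

def deterministic_plan_py_alt (task : String) : List (String × String) :=
  let i := PySem.Str.find task ":"
  let body := if 0 ≤ i then PySem.Str.slice task (some (i + 1)) none else task
  let normalized := PySem.Str.lower (PySem.Str.strip body)
  -- [g for m, g in _MARKER_GROUP if m in normalized]
  let hits := (altMarkerGroup.filter (fun p => PySem.Str.isIn p.1 normalized)).map Prod.snd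
  -- min(hits, default=len(_PLANS) - 1)
  let best := (PySem.List.min? hits (fun y => y)).getD ((altPlans.length : Int) - 1)
  -- _PLANS[best]; best is always a valid index, so the none branch is unreachable
  match PySem.List.pyGet? altPlans best with
  | some plan => plan
  | none => []

-- ===== PRECONDITION & SPEC =====
def Spec_deterministic_plan_py (task : String) (out : List (String × String)) : Prop := out = deterministic_plan_py_alt task
instance (task : String) (out : List (String × String)) : Decidable (Spec_deterministic_plan_py task out) := by unfold Spec_deterministic_plan_py; infer_instance

-- ===== CLAIM =====
def Claim_equal_deterministic_plan_py : Prop := ∀ (task : String), Dom_deterministic_plan_py task → Spec_deterministic_plan_py task (deterministic_plan_py task)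

-- ===== LEMMAS AND PROOFS =====

lemma singleton_prefix_head (a : Char) (l : List Char) : [a] <+: l ↔ l.head? = some a := by
  cases l <;> simp [List.prefix_cons_iff, eq_comm]

lemma afterColonA_drop (cs : List Char) (k : Nat)
    (hk : cs[k]? = some ':') (hmin : ∀ i < k, cs[i]? ≠ some ':') :
    afterColonA cs = cs.drop (k + 1) := by
  induction cs generalizing k with
  | nil => simp at hk
  | cons c cs ih =>
    cases k with
    | zero =>
      simp at hk
      simp [afterColonA, hk]
    | succ k =>
      have hc : ¬ c = ':' := by
        have := hmin 0 (Nat.succ_pos k)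
        simpa using this
      simp only [afterColonA, if_neg hc, List.drop_succ_cons]
      exact ih k (by simpa using hk) (fun i hi => by
        have := hmin (i + 1) (by omega)
        simpa using this)

-- the stripped bodies of the two ports coincide
lemma body_eq (cs : List Char) :
    (if PySem.Chars.isIn [':'] cs = false then cs else afterColonA cs)
    = (if 0 ≤ PySem.Chars.find cs [':'] then
         PySem.List.slice cs (some (PySem.Chars.find cs [':'] + 1)) none else cs) := by
  by_cases h : PySem.Chars.isIn [':'] cs = true
  · have hinf : [':'] <:+: cs := (PySem.Chars.isIn_iff_infix _ _).mp h
    have hpos : 0 ≤ PySem.Chars.find cs [':'] := (PySem.Chars.find_nonneg_iff _ _).mpr hinf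
    obtain ⟨hpre, hmin⟩ := PySem.Chars.find_spec (s := cs) (sub := [':']) hpos
    rw [if_neg (by simp [h]), if_pos hpos]
    rw [PySem.List.slice_from cs (by omega)]
    have hk : cs[(PySem.Chars.find cs [':']).toNat]? = some ':' := by
      have := (singleton_prefix_head ':' (cs.drop (PySem.Chars.find cs [':']).toNat)).mp hpre
      simpa [List.head?_drop] using this
    have hmin' : ∀ i < (PySem.Chars.find cs [':']).toNat, cs[i]? ≠ some ':' := by
      intro i hi hEq
      exact hmin i hi ((singleton_prefix_head ':' (cs.drop i)).mpr (by simpa [List.head?_drop] using hEq))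
    rw [afterColonA_drop cs _ hk hmin']
    congr 1
    omega
  · have h' : PySem.Chars.isIn [':'] cs = false := by simpa using h
    have hneg : PySem.Chars.find cs [':'] = -1 :=
      (PySem.Chars.find_eq_neg_one_iff _ _).mpr ((PySem.Chars.isIn_eq_false_iff _ _).mp h')
    rw [if_pos h', if_neg (by rw [hneg]; norm_num)]

lemma stripped_eq (task : String) :
    strip_prefix_py task
    = PySem.Str.strip (if 0 ≤ PySem.Str.find task ":" then
        PySem.Str.slice task (some (PySem.Str.find task ":" + 1)) none else task) := by
  unfold strip_prefix_py
  rw [← apply_ite PySem.Str.strip]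
  congr 1
  apply String.toList_inj.mp
  rw [apply_ite String.toList, apply_ite String.toList]
  have hc : (":" : String).toList = [':'] := by decide
  simpa [hc] using body_eq task.toList

-- min? of a ≤-sorted Int list is its head
lemma min?_sorted (xs : List Int) (h : xs.Pairwise (· ≤ ·)) :
    PySem.List.min? xs (fun y => y) = xs.head? := by
  cases xs with
  | nil => simp [PySem.List.min?]
  | cons x t =>
    rw [PySem.List.min?_id_cons]
    have hle : ∀ y ∈ t, x ≤ y := (List.pairwise_cons.mp h).1
    have h1 := (PySem.List.foldl_min_le t x).1
    have h2 := PySem.List.foldl_min_mem t x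
    have : List.foldl min x t = x := by
      rcases h2 with h2 | h2
      · exact h2
      · exact le_antisymm h1 (hle _ h2)
    simp [this]

-- head of the matches of a constant-group segment
lemma seg_head (pred : String × Int → Bool) (g : Int) (ms : List (String × Int))
    (hg : ∀ p ∈ ms, p.2 = g) :
    ((ms.filter pred).map Prod.snd).head? = if ms.any pred then some g else none := by
  induction ms with
  | nil => simp
  | cons p ms ih =>
    by_cases hp : pred p
    · simp [hp, hg p (by simp)]
    · have hpf : pred p = false := by simpa using hp
      have := ih (fun q hq => hg q (by simp [hq]))
      rw [List.filter_cons, List.any_cons, hpf]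
      simpa using this

-- the two classification computations, as functions of the normalized string
def chainOf (N : String) : List (String × String) :=
  if PySem.Str.isIn "active agreement" N || PySem.Str.isIn "active promise" N then
    [("worker", "incompatible"), ("reason", "Recall")]
  else if ["current weather", "current temperature", "opening status", "current opening",
           "exchange rate", "current price"].any (fun m => PySem.Str.isIn m N) then
    [("worker", "incompatible"), ("reason", "Live-context")]
  else if ["profile", "impression", "relationship", "compatibility"].any
           (fun m => PySem.Str.isIn m N) then
    [("worker", "incompatible"), ("reason", "Person-context")]
  else if ["named fact", "proper noun", "memory_name", "dedup_key", "tag", "exact", "\""].any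
           (fun m => PySem.Str.isIn m N) then
    [("worker", "persistent_memory_keyword_agent"),
     ("reason", "durable named fact or exact memory evidence")]
  else
    [("worker", "persistent_memory_search_agent"),
     ("reason", "semantic durable memory evidence")]

def aggOf (N : String) : List (String × String) :=
  match PySem.List.pyGet? altPlans
      ((PySem.List.min?
          ((altMarkerGroup.filter (fun p => PySem.Str.isIn p.1 N)).map Prod.snd)
          (fun y => y)).getD ((altPlans.length : Int) - 1)) with
  | some plan => plan
  | none => []

lemma chain_eq_agg (N : String) : chainOf N = aggOf N := by
  unfold chainOf aggOf
  have hpw : ((altMarkerGroup.filter (fun p => PySem.Str.isIn p.1 N)).map Prod.snd).Pairwise (· ≤ ·) := by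
    apply List.Pairwise.map (R := fun p q : String × Int => p.2 ≤ q.2) _ (fun _ _ h => h)
    exact List.Pairwise.filter _ (by unfold altMarkerGroup; decide)
  rw [min?_sorted _ hpw]
  have hsplit : altMarkerGroup
      = [("active agreement", (0:Int)), ("active promise", 0)]
        ++ [("current weather", 1), ("current temperature", 1), ("opening status", 1),
            ("current opening", 1), ("exchange rate", 1), ("current price", 1)]
        ++ [("profile", 2), ("impression", 2), ("relationship", 2), ("compatibility", 2)]
        ++ [("named fact", 3), ("proper noun", 3), ("memory_name", 3), ("dedup_key", 3),
            ("tag", 3), ("exact", 3), ("\"", 3)] := by rfl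
  rw [hsplit]
  simp only [List.filter_append, List.map_append, List.head?_append]
  rw [seg_head _ 0 _ (by decide), seg_head _ 1 _ (by decide),
      seg_head _ 2 _ (by decide), seg_head _ 3 _ (by decide)]
  have e1 : ([("active agreement", (0:Int)), ("active promise", 0)].any
        (fun p => PySem.Str.isIn p.1 N))
      = (PySem.Str.isIn "active agreement" N || PySem.Str.isIn "active promise" N) := by simp
  have e2 : ([("current weather", (1:Int)), ("current temperature", 1), ("opening status", 1),
        ("current opening", 1), ("exchange rate", 1), ("current price", 1)].any
        (fun p => PySem.Str.isIn p.1 N))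
      = (["current weather", "current temperature", "opening status", "current opening",
          "exchange rate", "current price"].any (fun m => PySem.Str.isIn m N)) := by simp
  have e3 : ([("profile", (2:Int)), ("impression", 2), ("relationship", 2),
        ("compatibility", 2)].any (fun p => PySem.Str.isIn p.1 N))
      = (["profile", "impression", "relationship", "compatibility"].any
          (fun m => PySem.Str.isIn m N)) := by simp
  have e4 : ([("named fact", (3:Int)), ("proper noun", 3), ("memory_name", 3), ("dedup_key", 3),
        ("tag", 3), ("exact", 3), ("\"", 3)].any (fun p => PySem.Str.isIn p.1 N))
      = (["named fact", "proper noun", "memory_name", "dedup_key", "tag", "exact", "\""].any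
          (fun m => PySem.Str.isIn m N)) := by simp
  rw [e1, e2, e3, e4]
  by_cases h1 : (PySem.Str.isIn "active agreement" N || PySem.Str.isIn "active promise" N) = true
  · simp only [h1]
    simp [altPlans, PySem.List.pyGet?, PySem.List.pyIdx?]
  · have h1f : (PySem.Str.isIn "active agreement" N || PySem.Str.isIn "active promise" N) = false := by
      simpa using h1
    by_cases h2 : (["current weather", "current temperature", "opening status", "current opening",
        "exchange rate", "current price"].any (fun m => PySem.Str.isIn m N)) = true
    · simp only [h1f, h2]
      simp [altPlans, PySem.List.pyGet?, PySem.List.pyIdx?]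
    · have h2f := (Bool.not_eq_true _).mp h2
      by_cases h3 : (["profile", "impression", "relationship", "compatibility"].any
          (fun m => PySem.Str.isIn m N)) = true
      · simp only [h1f, h2f, h3]
        simp [altPlans, PySem.List.pyGet?, PySem.List.pyIdx?]
      · have h3f := (Bool.not_eq_true _).mp h3
        by_cases h4 : (["named fact", "proper noun", "memory_name", "dedup_key", "tag", "exact",
            "\""].any (fun m => PySem.Str.isIn m N)) = true
        · simp only [h1f, h2f, h3f, h4]
          simp [altPlans, PySem.List.pyGet?, PySem.List.pyIdx?]
        · have h4f := (Bool.not_eq_true _).mp h4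
          simp only [h1f, h2f, h3f, h4f]
          simp [altPlans, PySem.List.pyGet?, PySem.List.pyIdx?]

theorem deterministic_plan_py_spec : Claim_equal_deterministic_plan_py := by
  intro task _
  unfold Spec_deterministic_plan_py
  have hA : deterministic_plan_py task = chainOf (PySem.Str.lower (strip_prefix_py task)) := rfl
  have hB : deterministic_plan_py_alt task
      = aggOf (PySem.Str.lower (PySem.Str.strip (if 0 ≤ PySem.Str.find task ":" then
          PySem.Str.slice task (some (PySem.Str.find task ":" + 1)) none else task))) := rfl
  rw [hA, hB, stripped_eq, chain_eq_agg]
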